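-- pv_equiv track=rewrite | github.com/adrian-dybwad/DGTCentaurMods | DGTCentaurMods/opt/DGTCentaurMods/epaper/framework/widget.py | _generate_dither_pattern
-- ===== SOURCE A (Python) =====
-- _BAYER_8x8 = [
--     [ 0, 32,  8, 40,  2, 34, 10, 42],
--     [48, 16, 56, 24, 50, 18, 58, 26],
--     [12, 44,  4, 36, 14, 46,  6, 38],
--     [60, 28, 52, 20, 62, 30, 54, 22],
--     [ 3, 35, 11, 43,  1, 33,  9, 41],
--     [51, 19, 59, 27, 49, 17, 57, 25],
--     [15, 47,  7, 39, 13, 45,  5, 37],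
--     [63, 31, 55, 23, 61, 29, 53, 21],
-- ]
--
-- def _generate_dither_pattern(shade: int) -> list:
--     """Generate an 8x8 dither pattern for a given shade level.
--
--     Args:
--         shade: Shade level 0-16 (0=white, 16=black)
--
--     Returns:
--         8x8 list of 0s (white) and 1s (black)
--     """
--     # Map shade 0-16 to threshold 0-64
--     # shade 0 = threshold 0 (all white)
--     # shade 16 = threshold 64 (all black)
--     threshold = shade * 4  # 0, 4, 8, 12, ... 64
--
--     pattern = []
--     for row in _BAYER_8x8:
--         pattern_row = []
--         for val in row:
--             # Pixel is black if Bayer value is less than threshold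
--             pattern_row.append(1 if val < threshold else 0)
--         pattern.append(pattern_row)
--     return pattern
-- ===== SOURCE B (Python) =====
-- def _generate_dither_pattern(shade: int) -> list:
--     """Same result as A, but the 8x8 Bayer matrix is derived from the
--     standard ordered-dither recurrence instead of a hardcoded table."""
--     m = [[0, 2], [3, 1]]
--     while len(m) < 8:
--         m = ([[4 * v for v in row] + [4 * v + 2 for v in row] for row in m]
--              + [[4 * v + 3 for v in row] + [4 * v + 1 for v in row] for row in m])
--     t = shade * 4
--     return [[1 if v < t else 0 for v in row] for row in m]
-- ===== Notes on version B (the rewrite author's own statement) =====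
-- stated objective: idiomatic
-- what changed: B derives the 8x8 Bayer matrix from the ordered-dither recurrence (base [[0,2],[3,1]] expanded twice into [[4M,4M+2],[4M+3,4M+1]]) instead of reading a hardcoded table literal, then thresholds it.
import Mathlib
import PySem

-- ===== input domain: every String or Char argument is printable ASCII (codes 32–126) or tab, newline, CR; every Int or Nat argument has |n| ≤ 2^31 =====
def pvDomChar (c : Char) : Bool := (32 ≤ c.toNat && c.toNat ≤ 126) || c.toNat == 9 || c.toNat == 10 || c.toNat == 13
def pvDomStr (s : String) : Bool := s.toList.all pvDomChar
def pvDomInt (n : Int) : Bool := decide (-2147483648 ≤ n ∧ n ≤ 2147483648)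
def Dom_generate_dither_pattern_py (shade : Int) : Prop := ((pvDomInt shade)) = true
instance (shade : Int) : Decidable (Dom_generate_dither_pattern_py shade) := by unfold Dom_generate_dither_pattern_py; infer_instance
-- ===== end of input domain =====

-- B derives the 8x8 Bayer matrix from the ordered-dither recurrence instead of a hardcoded table (idiomatic; same result).


-- ===== PORT A =====
def pvBAYER_8x8 : List (List Int) := [
  [ 0, 32,  8, 40,  2, 34, 10, 42],
  [48, 16, 56, 24, 50, 18, 58, 26],
  [12, 44,  4, 36, 14, 46,  6, 38],
  [60, 28, 52, 20, 62, 30, 54, 22],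
  [ 3, 35, 11, 43,  1, 33,  9, 41],
  [51, 19, 59, 27, 49, 17, 57, 25],
  [15, 47,  7, 39, 13, 45,  5, 37],
  [63, 31, 55, 23, 61, 29, 53, 21]]

def generate_dither_pattern_py (shade : Int) : List (List Int) :=
  let threshold := shade * 4
  pvBAYER_8x8.foldl (fun pattern row =>
    pattern ++ [row.foldl (fun pr val => pr ++ [if val < threshold then (1 : Int) else 0]) []]) []

-- ===== PORT B =====
-- one expansion step of the ordered-dither recurrence: M ↦ [[4M, 4M+2],[4M+3, 4M+1]]
def pvExpand (m : List (List Int)) : List (List Int) :=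
  (m.map fun row => (row.map fun v => 4 * v) ++ (row.map fun v => 4 * v + 2))
  ++ (m.map fun row => (row.map fun v => 4 * v + 3) ++ (row.map fun v => 4 * v + 1))

-- the 'while len(m) < 8' loop, fuel-bounded (fuel 8 suffices: the length doubles each step)
def pvGrow : Nat → List (List Int) → List (List Int)
  | 0, m => m
  | n + 1, m => if m.length < 8 then pvGrow n (pvExpand m) else m

def generate_dither_pattern_py_alt (shade : Int) : List (List Int) :=
  let m := pvGrow 8 [[0, 2], [3, 1]]
  let t := shade * 4
  m.map fun row => row.map fun v => if v < t then (1 : Int) else 0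

-- ===== PRECONDITION & SPEC =====
def Spec_generate_dither_pattern_py (shade : Int) (out : List (List Int)) : Prop := out = generate_dither_pattern_py_alt shade
instance (shade : Int) (out : List (List Int)) : Decidable (Spec_generate_dither_pattern_py shade out) := by unfold Spec_generate_dither_pattern_py; infer_instance

-- ===== CLAIM (what is proved, stated in full; the proofs are below) =====
def Claim_equal_generate_dither_pattern_py : Prop := ∀ (shade : Int), Dom_generate_dither_pattern_py shade → Spec_generate_dither_pattern_py shade (generate_dither_pattern_py shade)

-- ===== LEMMAS AND PROOFS =====

-- ===== VERDICT (by name: the statement is the Claim_ definition above) =====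
set_option maxRecDepth 4000 in
theorem generate_dither_pattern_py_spec : Claim_equal_generate_dither_pattern_py := by
  intro shade _
  show generate_dither_pattern_py shade = generate_dither_pattern_py_alt shade
  rfl
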